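-- pv_equiv track=rewrite | github.com/54skyxenon/USACO-Training | Chapter 5/5_1/starry.py | get_subgrid
-- ===== SOURCE A (Python) =====
-- def get_subgrid(cluster_data):
--     lower_r = lower_c = float('inf')
--     upper_r = upper_c = float('-inf')
--
--     for r, c in cluster_data:
--         lower_r = min(lower_r, r)
--         lower_c = min(lower_c, c)
--         upper_r = max(upper_r, r)
--         upper_c = max(upper_c, c)
--
--     subgrid = []
--     for r in range(lower_r, upper_r + 1):
--         row = []
--         for c in range(lower_c, upper_c + 1):
--             if (r, c) in cluster_data:
--                 row.append('1')
--             else: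
--                 row.append('0')
--         subgrid.append(row)
--
--     return subgrid
-- ===== SOURCE B (Python) =====
-- def get_subgrid(cluster_data):
--     rows = [r for r, _ in cluster_data]
--     cols = [c for _, c in cluster_data]
--     lower_r, upper_r = min(rows), max(rows)
--     lower_c, upper_c = min(cols), max(cols)
--     width = upper_c - lower_c + 1
--     subgrid = []
--     for r in range(lower_r, upper_r + 1):
--         row = ['0'] * width
--         for pr, pc in cluster_data:
--             if pr == r:
--                 row[pc - lower_c] = '1'
--         subgrid.append(row)
--     return subgrid
-- ===== Notes on version B (the rewrite author's own statement) =====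
-- stated objective: faster
-- what changed: Bounds come from min()/max() over the projected row/column lists instead of A's running 4-tuple fold, and each row is built as a zero-filled list with a per-row scatter (set row[pc-lower_c]='1' for the points on that row) instead of A's per-cell membership test '(r,c) in cluster_data'; intended as faster (inner membership scan removed), a timing run measured ~1.8-2.2x at the largest size.
-- outside the precondition, e.g. on get_subgrid(set()): A raises TypeError, B raises ValueError
import Mathlib
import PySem

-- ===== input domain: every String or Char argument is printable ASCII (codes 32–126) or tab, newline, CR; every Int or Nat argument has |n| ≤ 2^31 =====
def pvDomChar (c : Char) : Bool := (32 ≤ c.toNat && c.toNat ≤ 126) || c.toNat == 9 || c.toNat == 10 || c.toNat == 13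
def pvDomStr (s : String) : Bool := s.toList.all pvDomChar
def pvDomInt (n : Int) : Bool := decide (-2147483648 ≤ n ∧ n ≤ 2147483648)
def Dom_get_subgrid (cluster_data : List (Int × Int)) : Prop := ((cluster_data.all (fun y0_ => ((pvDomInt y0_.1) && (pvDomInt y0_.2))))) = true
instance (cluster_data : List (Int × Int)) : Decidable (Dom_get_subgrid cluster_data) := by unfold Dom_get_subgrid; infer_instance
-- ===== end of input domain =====

-- B takes the bounds from min()/max() of the projected row/column lists and builds each row
-- by a per-row scatter into a zero-filled list, instead of A's running 4-tuple bounds fold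
-- and per-cell '(r,c) in cluster_data' membership test (return value only; no mutation).

-- ===== PORT A =====
def get_subgrid (cluster_data : List (Int × Int)) : List (List String) :=
  match cluster_data with
  | [] => []   -- Python raises TypeError here (range over float('inf')); excluded by Pre_
  | (r0, c0) :: rest =>
    let b := rest.foldl
      (fun b p => (min b.1 p.1, min b.2.1 p.2, max b.2.2.1 p.1, max b.2.2.2 p.2))
      (r0, c0, r0, c0)
    (PySem.List.pyRange b.1 (b.2.2.1 + 1) 1).map (fun r =>
      (PySem.List.pyRange b.2.1 (b.2.2.2 + 1) 1).map (fun c =>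
        if (r, c) ∈ cluster_data then "1" else "0"))

-- ===== PORT B =====
def get_subgrid_alt (cluster_data : List (Int × Int)) : List (List String) :=
  let rows := cluster_data.map Prod.fst
  let cols := cluster_data.map Prod.snd
  match PySem.List.min? rows (fun y => y), PySem.List.max? rows (fun y => y),
        PySem.List.min? cols (fun y => y), PySem.List.max? cols (fun y => y) with
  | some lower_r, some upper_r, some lower_c, some upper_c =>
    let width := upper_c - lower_c + 1
    (PySem.List.pyRange lower_r (upper_r + 1) 1).map (fun r =>
      cluster_data.foldl
        (fun row q => if q.1 == r then row.set (q.2 - lower_c).natAbs "1" else row)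
        (List.replicate width.toNat "0"))
  | _, _, _, _ => []   -- Python min([]) raises ValueError here; excluded by Pre_

-- ===== PRECONDITION & SPEC =====
-- Pre_ excludes only the empty list, on which both Pythons raise (TypeError in A, ValueError in B).
def Pre_get_subgrid (cluster_data : List (Int × Int)) : Prop := cluster_data ≠ []
instance (cluster_data : List (Int × Int)) : Decidable (Pre_get_subgrid cluster_data) := by
  unfold Pre_get_subgrid; infer_instance
def pvWitness_get_subgrid : (List (Int × Int)) := [(2, 3), (0, 0), (2, 0)]

def Spec_get_subgrid (cluster_data : List (Int × Int)) (out : List (List String)) : Prop := out = get_subgrid_alt cluster_data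
instance (cluster_data : List (Int × Int)) (out : List (List String)) : Decidable (Spec_get_subgrid cluster_data out) := by unfold Spec_get_subgrid; infer_instance

-- ===== CLAIM (what is proved, stated in full; the proofs are below) =====
def Claim_equal_get_subgrid : Prop := ∀ (cluster_data : List (Int × Int)), Dom_get_subgrid cluster_data → Pre_get_subgrid cluster_data → Spec_get_subgrid cluster_data (get_subgrid cluster_data)

-- ===== LEMMAS AND PROOFS =====

-- the gather row of A over an arbitrary point set S
def pvRow (r lc uc : Int) (S : List (Int × Int)) : List String :=
  (PySem.List.pyRange lc (uc + 1) 1).map (fun c => if (r, c) ∈ S then "1" else "0")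

-- component decomposition of A's 4-tuple bounds fold
lemma bounds_fold_components (rest : List (Int × Int)) :
    ∀ (b : Int × Int × Int × Int),
      rest.foldl (fun b p => (min b.1 p.1, min b.2.1 p.2, max b.2.2.1 p.1, max b.2.2.2 p.2)) b
      = (rest.foldl (fun a p => min a p.1) b.1,
         rest.foldl (fun a p => min a p.2) b.2.1,
         rest.foldl (fun a p => max a p.1) b.2.2.1,
         rest.foldl (fun a p => max a p.2) b.2.2.2) := by
  induction rest with
  | nil => intro b; rfl
  | cons q t ih => intro b; simpa using ih (min b.1 q.1, min b.2.1 q.2, max b.2.2.1 q.1, max b.2.2.2 q.2)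

lemma pvRow_zero (r lc uc : Int) :
    List.replicate (uc - lc + 1 : Int).toNat "0" = pvRow r lc uc [] := by
  unfold pvRow
  apply List.ext_getElem
  · simp [PySem.List.length_pyRange_one]
    omega
  · intro i h1 h2
    simp

-- one scatter step on a row
lemma pvRow_step (r lc uc : Int) (q : Int × Int) (S : List (Int × Int))
    (h3 : lc ≤ q.2) (_h4 : q.2 ≤ uc) :
    (if q.1 == r then (pvRow r lc uc S).set (q.2 - lc).natAbs "1" else pvRow r lc uc S)
      = pvRow r lc uc (S ++ [q]) := by
  by_cases hq : q.1 = r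
  · rw [if_pos (by simpa using hq)]
    apply List.ext_getElem (by simp [pvRow])
    intro j hj1 hj2
    have hj : j < (uc + 1 - lc).toNat := by
      simpa [pvRow, PySem.List.length_pyRange_one] using hj2
    rw [List.getElem_set]
    simp only [pvRow, List.getElem_map, PySem.List.getElem_pyRange_one]
    by_cases hjk : (q.2 - lc).natAbs = j
    · have hc : lc + (j : Int) = q.2 := by omega
      rw [if_pos hjk]
      have heq : ((r, lc + (j : Int)) : Int × Int) = q := by
        rw [hc, ← hq]
      simp [List.mem_append, heq]
    · have hc : lc + (j : Int) ≠ q.2 := by omega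
      rw [if_neg hjk]
      have hne : ((r, lc + (j : Int)) : Int × Int) ≠ q := by
        intro h; exact hc (congrArg Prod.snd h)
      simp only [List.mem_append, List.mem_singleton, hne, or_false]
  · rw [if_neg (by simpa using hq)]
    unfold pvRow
    apply List.map_congr_left
    intro cc _
    have hne : ((r, cc) : Int × Int) ≠ q := by
      intro h; exact hq (congrArg Prod.fst h).symm
    simp only [List.mem_append, List.mem_singleton, hne, or_false]

-- B's per-row scatter fold computes A's gather row
lemma row_scatter (r lc uc : Int) :
    ∀ (rest pro : List (Int × Int)),
      (∀ p ∈ rest, lc ≤ p.2 ∧ p.2 ≤ uc) →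
      rest.foldl (fun row q => if q.1 == r then row.set (q.2 - lc).natAbs "1" else row)
        (pvRow r lc uc pro)
      = pvRow r lc uc (pro ++ rest) := by
  intro rest
  induction rest with
  | nil => intro pro _; simp
  | cons q t ih =>
    intro pro hb
    obtain ⟨hq3, hq4⟩ := hb q (List.mem_cons_self ..)
    simp only [List.foldl_cons]
    rw [pvRow_step r lc uc q pro hq3 hq4,
      ih (pro ++ [q]) (fun p hp => hb p (List.mem_cons_of_mem _ hp))]
    simp

-- ===== VERDICT (by name: the statement is the Claim_ definition above) =====
theorem get_subgrid_spec : Claim_equal_get_subgrid := by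
  intro cluster_data _ hpre
  unfold Spec_get_subgrid
  match cluster_data with
  | [] => exact absurd rfl hpre
  | (r0, c0) :: rest =>
    unfold get_subgrid get_subgrid_alt
    simp only [List.map_cons, PySem.List.min?_id_cons, PySem.List.max?_id_cons,
      List.foldl_map, bounds_fold_components]
    set lr := rest.foldl (fun a p => min a p.1) r0 with hlr
    set lc := rest.foldl (fun a p => min a p.2) c0 with hlc
    set ur := rest.foldl (fun a p => max a p.1) r0 with hur
    set uc := rest.foldl (fun a p => max a p.2) c0 with huc
    have hlc' : lc = (rest.map Prod.snd).foldl min c0 := by rw [hlc, List.foldl_map]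
    have huc' : uc = (rest.map Prod.snd).foldl max c0 := by rw [huc, List.foldl_map]
    obtain ⟨hmin1, hmin2⟩ := PySem.List.foldl_min_le (rest.map Prod.snd) c0
    obtain ⟨hmax1, hmax2⟩ := PySem.List.le_foldl_max (rest.map Prod.snd) c0
    have hbnd : ∀ p ∈ (r0, c0) :: rest, lc ≤ p.2 ∧ p.2 ≤ uc := by
      intro p hp
      rcases List.mem_cons.mp hp with rfl | hp
      · exact ⟨hlc' ▸ hmin1, huc' ▸ hmax1⟩
      · have hm : p.2 ∈ rest.map Prod.snd := List.mem_map_of_mem hp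
        exact ⟨hlc' ▸ hmin2 p.2 hm, huc' ▸ hmax2 p.2 hm⟩
    apply List.map_congr_left
    intro r _
    rw [pvRow_zero r lc uc, row_scatter r lc uc ((r0, c0) :: rest) [] hbnd]
    rfl
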